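-- pv_equiv track=rewrite | github.com/timtronic477/codewars | Ordered Count of Characters.py | ordered_count
-- ===== SOURCE A (Python) =====
-- def ordered_count(inp):
--     letters = {}
--     lst = []
--     for i in inp:
--         letters[i] = letters.get(i, 0) + 1
--     for x,y in letters.items():
--         lst.append((x, y))
--     return lst
-- ===== SOURCE B (Python) =====
-- def ordered_count(inp):
--     if not inp:
--         return []
--     c = inp[0]
--     rest = ''.join(ch for ch in inp if ch != c)
--     return [(c, len(inp) - len(rest))] + ordered_count(rest)
-- ===== Notes on version B (the rewrite author's own statement) =====
-- stated objective: alternative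
-- what changed: Replaces the dict-accumulation pass by a partition recursion: take the first character, strip every occurrence of it, record its count as the length difference, and recurse on the stripped remainder; no dict, no counter, no seen-set.
import Mathlib
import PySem

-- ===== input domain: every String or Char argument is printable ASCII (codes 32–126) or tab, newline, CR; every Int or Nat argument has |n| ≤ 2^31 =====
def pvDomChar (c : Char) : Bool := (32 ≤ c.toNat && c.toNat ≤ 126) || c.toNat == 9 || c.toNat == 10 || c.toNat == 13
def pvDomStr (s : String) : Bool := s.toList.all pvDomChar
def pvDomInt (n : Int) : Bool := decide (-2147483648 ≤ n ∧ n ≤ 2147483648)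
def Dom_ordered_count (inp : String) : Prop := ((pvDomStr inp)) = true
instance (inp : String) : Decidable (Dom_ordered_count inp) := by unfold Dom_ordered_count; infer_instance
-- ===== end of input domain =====

-- B replaces A's frequency-dict accumulation by a partition recursion: strip all copies of the
-- first character, record its count as the length difference, recurse on the remainder (alternative).


-- ===== PORT A =====
-- iterating a Python string yields one-character strings: a char c is keyed as String.ofList [c]
def ordered_count (inp : String) : List (String × Int) :=
  let letters : PySem.Dict String Int :=
    inp.toList.foldl
      (fun d c => d.insert (String.ofList [c]) (d.getD (String.ofList [c]) 0 + 1))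
      PySem.Dict.empty
  letters.items.foldl (fun lst p => lst ++ [(p.1, p.2)]) []

-- ===== PORT B =====
-- ''.join(ch for ch in inp if ch != c) is List.filter; len(inp) - len(rest) is the length difference
def ordered_count_alt_core (l : List Char) : List (String × Int) :=
  match l with
  | [] => []
  | c :: tl =>
    let rest := (c :: tl).filter (fun ch => !(ch == c))
    (String.ofList [c], ((c :: tl).length : Int) - (rest.length : Int)) ::
      ordered_count_alt_core rest
termination_by l.length
decreasing_by
  simp only [List.filter, beq_self_eq_true, Bool.not_true, List.length_cons]
  exact Nat.lt_succ_of_le (List.length_filter_le _ _)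

def ordered_count_alt (inp : String) : List (String × Int) :=
  ordered_count_alt_core inp.toList

-- ===== PRECONDITION & SPEC =====
def Spec_ordered_count (inp : String) (out : List (String × Int)) : Prop := out = ordered_count_alt inp
instance (inp : String) (out : List (String × Int)) : Decidable (Spec_ordered_count inp out) := by unfold Spec_ordered_count; infer_instance

-- ===== CLAIM =====
def Claim_equal_ordered_count : Prop := ∀ (inp : String), Dom_ordered_count inp → Spec_ordered_count inp (ordered_count inp)

-- ===== LEMMAS AND PROOFS =====

theorem discard_ofList (c : Char) (l : List Char) :
    (PySem.Set.ofList l).discard c = PySem.Set.ofList (l.filter (fun ch => !(ch == c))) := by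
  induction l with
  | nil => rfl
  | cons x l ih =>
    rw [PySem.Set.ofList_cons]
    by_cases h : x = c
    · subst h
      simp only [List.filter, beq_self_eq_true, Bool.not_true]
      rw [← ih]
      show PySem.Set.discard (x :: (PySem.Set.ofList l).discard x) x
          = (PySem.Set.ofList l).discard x
      simp only [PySem.Set.discard, List.filter, beq_self_eq_true, Bool.not_true,
        List.filter_filter]
      exact List.filter_congr (fun y _ => by rw [Bool.and_self])
    · have hb : (x == c) = false := by simp [h]
      simp only [List.filter, hb, Bool.not_false, PySem.Set.ofList_cons, ← ih]
      show PySem.Set.discard (x :: (PySem.Set.ofList l).discard x) c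
          = x :: PySem.Set.discard ((PySem.Set.ofList l).discard c) x
      simp only [PySem.Set.discard, List.filter, hb, Bool.not_false, List.filter_filter]
      exact congrArg _ (List.filter_congr (fun y _ => by rw [Bool.and_comm]))

theorem count_len (c : Char) (l : List Char) :
    ((l.length : Int) - ((l.filter (fun ch => !(ch == c))).length : Int)) = (l.count c : Int) := by
  induction l with
  | nil => simp
  | cons a l ih =>
    simp only [List.length_cons, List.filter, List.count_cons]
    by_cases h : a = c
    · subst h
      simp only [beq_self_eq_true, Bool.not_true, if_true]
      push_cast
      omega
    · have hb : (a == c) = false := by simp [h]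
      simp only [hb, Bool.not_false, List.length_cons]
      push_cast
      omega

-- B's recursion, characterised: first-occurrence distinct chars, each with its count
theorem core_eq : ∀ (n : Nat) (l : List Char), l.length ≤ n →
    ordered_count_alt_core l
      = (PySem.Set.ofList l).map (fun c => (String.ofList [c], (l.count c : Int))) := by
  intro n
  induction n with
  | zero =>
    intro l h
    have hl : l = [] := List.eq_nil_of_length_eq_zero (Nat.le_zero.mp h)
    subst hl
    simp [ordered_count_alt_core]
  | succ n ih =>
    intro l h
    match l with
    | [] => simp [ordered_count_alt_core]
    | c :: tl =>
      rw [ordered_count_alt_core]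
      simp only [List.filter, beq_self_eq_true, Bool.not_true]
      have hlen : (tl.filter (fun ch => !(ch == c))).length ≤ n :=
        le_trans (List.length_filter_le _ _) (by simpa using h)
      rw [ih _ hlen, PySem.Set.ofList_cons, List.map_cons, discard_ofList]
      refine congrArg₂ _ ?_ ?_
      · refine congrArg _ ?_
        rw [show ((c :: tl).length : Int) = (tl.length : Int) + 1 by simp,
            show ((c :: tl).count c : Int) = (tl.count c : Int) + 1 by simp]
        have := count_len c tl
        omega
      · refine List.map_congr_left ?_
        intro y hy
        have hmem := (PySem.Set.mem_ofList _ _).mp hy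
        have hyc : y ≠ c := by
          rcases List.mem_filter.mp hmem with ⟨_, hp⟩
          simpa using hp
        refine congrArg _ ?_
        rw [List.count_filter (by simpa using hyc)]
        simp [Ne.symm hyc]

theorem map_discard (s : List Char) (c : Char) :
    PySem.Set.discard (s.map (fun a => String.ofList [a])) (String.ofList [c])
      = (PySem.Set.discard s c).map (fun a => String.ofList [a]) := by
  simp only [PySem.Set.discard, List.filter_map]
  refine congrArg _ (List.filter_congr (fun x _ => ?_))
  by_cases h : x = c
  · simp [h]
  · have : String.ofList [x] ≠ String.ofList [c] := by
      intro he; exact h (by simpa using congrArg String.toList he)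
    simp [Function.comp, h, this]

theorem ofList_map_singleton (l : List Char) :
    PySem.Set.ofList (l.map (fun c => String.ofList [c]))
      = (PySem.Set.ofList l).map (fun c => String.ofList [c]) := by
  induction l with
  | nil => rfl
  | cons c l ih =>
    rw [List.map_cons, PySem.Set.ofList_cons, PySem.Set.ofList_cons, List.map_cons, ih,
        map_discard]

theorem count_key (inp : String) (c : Char) :
    ((inp.toList.map (fun c => String.ofList [c])).count (String.ofList [c]) : Int)
      = (inp.toList.count c : Int) := by
  have hinj : Function.Injective (fun c => String.ofList [c]) := by
    intro a b h; simpa using congrArg String.toList h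
  rw [List.count_map_of_injective _ _ hinj]

-- ===== VERDICT =====
theorem ordered_count_spec : Claim_equal_ordered_count := by
  intro inp _
  unfold Spec_ordered_count ordered_count ordered_count_alt
  dsimp only
  rw [show inp.toList.foldl
      (fun (d : PySem.Dict String Int) c =>
        d.insert (String.ofList [c]) (d.getD (String.ofList [c]) 0 + 1))
      PySem.Dict.empty
      = (inp.toList.map (fun c => String.ofList [c])).foldl
          (fun (d : PySem.Dict String Int) s => d.insert s (d.getD s 0 + 1))
          PySem.Dict.empty from
    by rw [List.foldl_map],
    PySem.Dict.foldl_insert_getD_add_one_eq_counter,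
    PySem.Dict.items_counter, PySem.List.foldl_append_singleton_eq_map,
    ofList_map_singleton, core_eq inp.toList.length inp.toList le_rfl]
  simp only [List.map_map]
  refine List.map_congr_left ?_
  intro c hc
  simp only [Function.comp]
  rw [count_key inp c]
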